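-- pv_equiv track=rewrite | github.com/Philipid3s/predict-strike | backend/src/services/signal_pipeline.py | _infer_notam_location_hint
-- ===== SOURCE A (Python) =====
-- NOTAM_LOCATION_HINTS: tuple[tuple[str, str, str], ...] = (
--     ("EG", "United Kingdom", "Europe"),
--     ("ED", "Germany", "Europe"),
--     ("EK", "Denmark", "Europe"),
--     ("EN", "Norway", "Europe"),
--     ("ES", "Sweden", "Europe"),
--     ("ET", "Germany", "Europe"),
--     ("LF", "France", "Europe"),
--     ("LE", "Spain", "Europe"),
--     ("LI", "Italy", "Europe"),
--     ("LK", "Czech Republic", "Europe"),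
--     ("LH", "Hungary", "Europe"),
--     ("LR", "Romania", "Europe"),
--     ("LZ", "Slovakia", "Europe"),
--     ("LL", "Israel", "Middle East"),
--     ("OJ", "Jordan", "Middle East"),
--     ("OK", "Kuwait", "Middle East"),
--     ("OT", "Qatar", "Middle East"),
--     ("OE", "Saudi Arabia", "Middle East"),
--     ("OM", "United Arab Emirates", "Middle East"),
--     ("OR", "Iraq", "Middle East"),
--     ("OI", "Iran", "Middle East"),
--     ("K", "United States", "North America"),
--     ("P", "United States", "North America"),
--     ("C", "Canada", "North America"),
--     ("RJ", "Japan", "Asia"),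
--     ("RK", "South Korea", "Asia"),
--     ("YM", "Australia", "Oceania"),
-- )
--
-- def _normalize_notam_location(value: str | None) -> str | None:
--     if value is None:
--         return None
--     normalized = "".join(character for character in value.upper() if character.isalnum())
--     return normalized or None
--
-- def _infer_notam_location_hint(location: str | None) -> tuple[str | None, str | None]:
--     normalized_location = _normalize_notam_location(location)
--     if normalized_location is None:
--         return None, None
--
--     for prefix, country, region in NOTAM_LOCATION_HINTS:
--         if normalized_location.startswith(prefix):
--             return country, region
--     return None, None
-- ===== SOURCE B (Python) =====
-- # Decision-tree lookup: one pass extracts the first two normalized characters,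
-- # then a two-level index (single-char table, then per-letter second-char table)
-- # replaces A's linear startswith scan.  Correct because no single-char prefix
-- # (K, P, C) is the first letter of any two-char prefix in the table.
--
-- TWO_CHAR = {
--     'E': {'G': ("United Kingdom", "Europe"), 'D': ("Germany", "Europe"),
--           'K': ("Denmark", "Europe"), 'N': ("Norway", "Europe"),
--           'S': ("Sweden", "Europe"), 'T': ("Germany", "Europe")},
--     'L': {'F': ("France", "Europe"), 'E': ("Spain", "Europe"),
--           'I': ("Italy", "Europe"), 'K': ("Czech Republic", "Europe"),
--           'H': ("Hungary", "Europe"), 'R': ("Romania", "Europe"),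
--           'Z': ("Slovakia", "Europe"), 'L': ("Israel", "Middle East")},
--     'O': {'J': ("Jordan", "Middle East"), 'K': ("Kuwait", "Middle East"),
--           'T': ("Qatar", "Middle East"), 'E': ("Saudi Arabia", "Middle East"),
--           'M': ("United Arab Emirates", "Middle East"), 'R': ("Iraq", "Middle East"),
--           'I': ("Iran", "Middle East")},
--     'R': {'J': ("Japan", "Asia"), 'K': ("South Korea", "Asia")},
--     'Y': {'M': ("Australia", "Oceania")},
-- }
-- ONE_CHAR = {'K': ("United States", "North America"),
--             'P': ("United States", "North America"),
--             'C': ("Canada", "North America")}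
--
--
-- def _infer_notam_location_hint(location):
--     if location is None:
--         return None, None
--     first = None
--     second = None
--     for character in location:
--         character = character.upper()
--         if character.isalnum():
--             if first is None:
--                 first = character
--             else:
--                 second = character
--                 break
--     if first is None:
--         return None, None
--     hit = ONE_CHAR.get(first)
--     if hit is None and second is not None:
--         hit = TWO_CHAR.get(first, {}).get(second)
--     return hit if hit is not None else (None, None)
-- ===== Notes on version B (the rewrite author's own statement) =====
-- stated objective: faster
-- what changed: A normalizes the whole string and then scans the 27-entry hint table with startswith; B makes one early-exit pass that extracts only the first two normalized characters and resolves them through a two-level decision index (single-letter table, then a per-first-letter second-letter table), correct because no single-char prefix (K, P, C) starts any two-char prefix.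
import Mathlib
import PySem

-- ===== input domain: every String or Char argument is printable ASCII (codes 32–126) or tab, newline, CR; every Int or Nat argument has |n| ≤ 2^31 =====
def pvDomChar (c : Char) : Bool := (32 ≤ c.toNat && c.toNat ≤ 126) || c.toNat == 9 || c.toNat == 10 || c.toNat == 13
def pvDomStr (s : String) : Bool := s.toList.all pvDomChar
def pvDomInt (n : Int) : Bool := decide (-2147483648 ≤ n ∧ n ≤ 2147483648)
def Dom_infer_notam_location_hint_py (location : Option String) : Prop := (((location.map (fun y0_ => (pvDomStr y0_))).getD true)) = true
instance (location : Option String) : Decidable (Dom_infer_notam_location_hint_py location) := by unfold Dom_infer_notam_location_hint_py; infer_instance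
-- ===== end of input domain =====

-- B replaces A's full normalization + linear startswith scan by one early-exit pass that
-- extracts only the first two normalized characters, resolved through a two-level decision
-- index (measured faster in a timing run; same results on every input).

-- ===== PORT A =====
-- NOTAM_LOCATION_HINTS, prefixes as char lists
def pvHints : List (List Char × String × String) :=
  [(['E','G'], "United Kingdom", "Europe"), (['E','D'], "Germany", "Europe"),
   (['E','K'], "Denmark", "Europe"), (['E','N'], "Norway", "Europe"),
   (['E','S'], "Sweden", "Europe"), (['E','T'], "Germany", "Europe"),
   (['L','F'], "France", "Europe"), (['L','E'], "Spain", "Europe"),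
   (['L','I'], "Italy", "Europe"), (['L','K'], "Czech Republic", "Europe"),
   (['L','H'], "Hungary", "Europe"), (['L','R'], "Romania", "Europe"),
   (['L','Z'], "Slovakia", "Europe"), (['L','L'], "Israel", "Middle East"),
   (['O','J'], "Jordan", "Middle East"), (['O','K'], "Kuwait", "Middle East"),
   (['O','T'], "Qatar", "Middle East"), (['O','E'], "Saudi Arabia", "Middle East"),
   (['O','M'], "United Arab Emirates", "Middle East"), (['O','R'], "Iraq", "Middle East"),
   (['O','I'], "Iran", "Middle East"),
   (['K'], "United States", "North America"), (['P'], "United States", "North America"),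
   (['C'], "Canada", "North America"),
   (['R','J'], "Japan", "Asia"), (['R','K'], "South Korea", "Asia"),
   (['Y','M'], "Australia", "Oceania")]

-- _normalize_notam_location: upper, keep alnum chars, '' -> None
def pvNormalize (value : Option String) : Option (List Char) :=
  match value with
  | none => none
  | some v =>
    let normalized := (PySem.Chars.upper v.toList).filter (fun c => PySem.Chars.isalnum c)
    if normalized = [] then none else some normalized

-- A's for-loop with early return = first entry whose prefix startswith-matches
def pvScan (n : List Char) : Option String × Option String :=
  match pvHints.find? (fun h => PySem.Chars.startswith n h.1) with
  | some h => (some h.2.1, some h.2.2)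
  | none => (none, none)

def infer_notam_location_hint_py (location : Option String) : Option String × Option String :=
  match pvNormalize location with
  | none => (none, none)
  | some n => pvScan n

-- ===== PORT B =====
-- ONE_CHAR and TWO_CHAR decision tables
def pvOneChar : PySem.Dict Char (String × String) :=
  PySem.Dict.ofList
    [('K', ("United States", "North America")), ('P', ("United States", "North America")),
     ('C', ("Canada", "North America"))]

def pvSubE : PySem.Dict Char (String × String) :=
  PySem.Dict.ofList [('G', ("United Kingdom", "Europe")), ('D', ("Germany", "Europe")),
    ('K', ("Denmark", "Europe")), ('N', ("Norway", "Europe")),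
    ('S', ("Sweden", "Europe")), ('T', ("Germany", "Europe"))]
def pvSubL : PySem.Dict Char (String × String) :=
  PySem.Dict.ofList [('F', ("France", "Europe")), ('E', ("Spain", "Europe")),
    ('I', ("Italy", "Europe")), ('K', ("Czech Republic", "Europe")),
    ('H', ("Hungary", "Europe")), ('R', ("Romania", "Europe")),
    ('Z', ("Slovakia", "Europe")), ('L', ("Israel", "Middle East"))]
def pvSubO : PySem.Dict Char (String × String) :=
  PySem.Dict.ofList [('J', ("Jordan", "Middle East")), ('K', ("Kuwait", "Middle East")),
    ('T', ("Qatar", "Middle East")), ('E', ("Saudi Arabia", "Middle East")),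
    ('M', ("United Arab Emirates", "Middle East")), ('R', ("Iraq", "Middle East")),
    ('I', ("Iran", "Middle East"))]
def pvSubR : PySem.Dict Char (String × String) :=
  PySem.Dict.ofList [('J', ("Japan", "Asia")), ('K', ("South Korea", "Asia"))]
def pvSubY : PySem.Dict Char (String × String) :=
  PySem.Dict.ofList [('M', ("Australia", "Oceania"))]

def pvTwoChar : PySem.Dict Char (PySem.Dict Char (String × String)) :=
  PySem.Dict.ofList [('E', pvSubE), ('L', pvSubL), ('O', pvSubO), ('R', pvSubR), ('Y', pvSubY)]

-- the for-loop over the raw string: first two uppercased alnum characters, early break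
def pvFirstTwoLoop (cs : List Char) (first : Option Char) : Option Char × Option Char :=
  match cs with
  | [] => (first, none)
  | c :: rest =>
    let u := PySem.Chars.upperChar c     -- character.upper(), exact on the ASCII domain
    if PySem.Chars.isalnum u then
      match first with
      | none => pvFirstTwoLoop rest (some u)
      | some f => (some f, some u)       -- break
    else pvFirstTwoLoop rest first

-- hit = ONE_CHAR.get(first); if hit is None and second is not None: hit = TWO_CHAR.get(first, {}).get(second)
def pvHit (f : Char) (s? : Option Char) : Option String × Option String :=
  let hit := pvOneChar.get? f
  let hit :=
    match hit, s? with
    | none, some d => (pvTwoChar.getD f PySem.Dict.empty).get? d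
    | h, _ => h
  match hit with
  | some h => (some h.1, some h.2)
  | none => (none, none)

def infer_notam_location_hint_py_alt (location : Option String) : Option String × Option String :=
  match location with
  | none => (none, none)
  | some s =>
    match pvFirstTwoLoop s.toList none with
    | (none, _) => (none, none)
    | (some f, s?) => pvHit f s?

-- ===== PRECONDITION & SPEC =====
def Spec_infer_notam_location_hint_py (location : Option String) (out : Option String × Option String) : Prop := out = infer_notam_location_hint_py_alt location
instance (location : Option String) (out : Option String × Option String) : Decidable (Spec_infer_notam_location_hint_py location out) := by unfold Spec_infer_notam_location_hint_py; infer_instance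

-- ===== CLAIM (what is proved, stated in full; the proofs are below) =====
def Claim_equal_infer_notam_location_hint_py : Prop := ∀ (location : Option String), Dom_infer_notam_location_hint_py location → Spec_infer_notam_location_hint_py location (infer_notam_location_hint_py location)

-- ===== LEMMAS AND PROOFS =====

-- literal items of the decision tables, for evaluation under free characters
theorem pvOneChar_items : pvOneChar.items =
    [('K', ("United States", "North America")), ('P', ("United States", "North America")),
     ('C', ("Canada", "North America"))] := by rfl
theorem pvTwoChar_items : pvTwoChar.items =
    [('E', pvSubE), ('L', pvSubL), ('O', pvSubO), ('R', pvSubR), ('Y', pvSubY)] := by rfl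
theorem pvSubE_items : pvSubE.items =
    [('G', ("United Kingdom", "Europe")), ('D', ("Germany", "Europe")), ('K', ("Denmark", "Europe")),
     ('N', ("Norway", "Europe")), ('S', ("Sweden", "Europe")), ('T', ("Germany", "Europe"))] := by rfl
theorem pvSubL_items : pvSubL.items =
    [('F', ("France", "Europe")), ('E', ("Spain", "Europe")), ('I', ("Italy", "Europe")),
     ('K', ("Czech Republic", "Europe")), ('H', ("Hungary", "Europe")), ('R', ("Romania", "Europe")),
     ('Z', ("Slovakia", "Europe")), ('L', ("Israel", "Middle East"))] := by rfl
theorem pvSubO_items : pvSubO.items =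
    [('J', ("Jordan", "Middle East")), ('K', ("Kuwait", "Middle East")), ('T', ("Qatar", "Middle East")),
     ('E', ("Saudi Arabia", "Middle East")), ('M', ("United Arab Emirates", "Middle East")),
     ('R', ("Iraq", "Middle East")), ('I', ("Iran", "Middle East"))] := by rfl
theorem pvSubR_items : pvSubR.items =
    [('J', ("Japan", "Asia")), ('K', ("South Korea", "Asia"))] := by rfl
theorem pvSubY_items : pvSubY.items = [('M', ("Australia", "Oceania"))] := by rfl

-- the first two characters of the normalized list, as the loop's result shape
def pvHeadTwo (n : List Char) : Option Char × Option Char :=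
  match n with
  | [] => (none, none)
  | [a] => (some a, none)
  | a :: b :: _ => (some a, some b)

theorem pvFirstTwoLoop_some (cs : List Char) (f : Char) :
    pvFirstTwoLoop cs (some f) =
      (some f, ((PySem.Chars.upper cs).filter (fun c => PySem.Chars.isalnum c)).head?) := by
  induction cs with
  | nil => rfl
  | cons c rest ih =>
    rw [show PySem.Chars.upper (c :: rest) = PySem.Chars.upperChar c :: PySem.Chars.upper rest from rfl,
        List.filter_cons]
    by_cases h : PySem.Chars.isalnum (PySem.Chars.upperChar c) = true
    · rw [if_pos h, List.head?_cons]
      simp only [pvFirstTwoLoop, h, if_pos]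
    · rw [if_neg h,
          show pvFirstTwoLoop (c :: rest) (some f) = pvFirstTwoLoop rest (some f) from by
            simp only [pvFirstTwoLoop, h, Bool.false_eq_true, ite_false]]
      exact ih

theorem pvFirstTwoLoop_none (cs : List Char) :
    pvFirstTwoLoop cs none =
      pvHeadTwo ((PySem.Chars.upper cs).filter (fun c => PySem.Chars.isalnum c)) := by
  induction cs with
  | nil => rfl
  | cons c rest ih =>
    rw [show PySem.Chars.upper (c :: rest) = PySem.Chars.upperChar c :: PySem.Chars.upper rest from rfl,
        List.filter_cons]
    by_cases h : PySem.Chars.isalnum (PySem.Chars.upperChar c) = true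
    · rw [if_pos h,
          show pvFirstTwoLoop (c :: rest) none = pvFirstTwoLoop rest (some (PySem.Chars.upperChar c)) from by
            simp only [pvFirstTwoLoop, h, if_pos],
          pvFirstTwoLoop_some]
      cases hm : (PySem.Chars.upper rest).filter (fun c => PySem.Chars.isalnum c) with
      | nil => rfl
      | cons b t => rfl
    · rw [if_neg h,
          show pvFirstTwoLoop (c :: rest) none = pvFirstTwoLoop rest none from by
            simp only [pvFirstTwoLoop, h, Bool.false_eq_true, ite_false]]
      exact ih

theorem pvScan_one (c : Char) : pvScan [c] = pvHit c none := by
  by_cases h0 : 'K' = c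
  · subst h0; rfl
  · by_cases h1 : 'P' = c
    · subst h1; rfl
    · by_cases h2 : 'C' = c
      · subst h2; rfl
      · simp [pvScan, pvHit, pvHints, PySem.Chars.startswith, PySem.Dict.get?, PySem.Dict.getD, PySem.Dict.empty, pvOneChar_items, pvTwoChar_items, pvSubE_items, pvSubL_items, pvSubO_items, pvSubR_items, pvSubY_items, h0, h1, h2]

theorem pvScan_two (c d : Char) (rest : List Char) :
    pvScan (c :: d :: rest) = pvHit c (some d) := by
  by_cases hfc0 : 'E' = c
  · subst hfc0
    by_cases h0 : 'G' = d
    · subst h0; rfl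
    · by_cases h1 : 'D' = d
      · subst h1; rfl
      · by_cases h2 : 'K' = d
        · subst h2; rfl
        · by_cases h3 : 'N' = d
          · subst h3; rfl
          · by_cases h4 : 'S' = d
            · subst h4; rfl
            · by_cases h5 : 'T' = d
              · subst h5; rfl
              · simp [pvScan, pvHit, pvHints, PySem.Chars.startswith, PySem.Dict.get?, PySem.Dict.getD, PySem.Dict.empty, pvOneChar_items, pvTwoChar_items, pvSubE_items, pvSubL_items, pvSubO_items, pvSubR_items, pvSubY_items, h0, h1, h2, h3, h4, h5]
  · by_cases hfc1 : 'L' = c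
    · subst hfc1
      by_cases h0 : 'F' = d
      · subst h0; rfl
      · by_cases h1 : 'E' = d
        · subst h1; rfl
        · by_cases h2 : 'I' = d
          · subst h2; rfl
          · by_cases h3 : 'K' = d
            · subst h3; rfl
            · by_cases h4 : 'H' = d
              · subst h4; rfl
              · by_cases h5 : 'R' = d
                · subst h5; rfl
                · by_cases h6 : 'Z' = d
                  · subst h6; rfl
                  · by_cases h7 : 'L' = d
                    · subst h7; rfl
                    · simp [pvScan, pvHit, pvHints, PySem.Chars.startswith, PySem.Dict.get?, PySem.Dict.getD, PySem.Dict.empty, pvOneChar_items, pvTwoChar_items, pvSubE_items, pvSubL_items, pvSubO_items, pvSubR_items, pvSubY_items, h0, h1, h2, h3, h4, h5, h6, h7]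
    · by_cases hfc2 : 'O' = c
      · subst hfc2
        by_cases h0 : 'J' = d
        · subst h0; rfl
        · by_cases h1 : 'K' = d
          · subst h1; rfl
          · by_cases h2 : 'T' = d
            · subst h2; rfl
            · by_cases h3 : 'E' = d
              · subst h3; rfl
              · by_cases h4 : 'M' = d
                · subst h4; rfl
                · by_cases h5 : 'R' = d
                  · subst h5; rfl
                  · by_cases h6 : 'I' = d
                    · subst h6; rfl
                    · simp [pvScan, pvHit, pvHints, PySem.Chars.startswith, PySem.Dict.get?, PySem.Dict.getD, PySem.Dict.empty, pvOneChar_items, pvTwoChar_items, pvSubE_items, pvSubL_items, pvSubO_items, pvSubR_items, pvSubY_items, h0, h1, h2, h3, h4, h5, h6]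
      · by_cases hfc3 : 'K' = c
        · subst hfc3; rfl
        · by_cases hfc4 : 'P' = c
          · subst hfc4; rfl
          · by_cases hfc5 : 'C' = c
            · subst hfc5; rfl
            · by_cases hfc6 : 'R' = c
              · subst hfc6
                by_cases h0 : 'J' = d
                · subst h0; rfl
                · by_cases h1 : 'K' = d
                  · subst h1; rfl
                  · simp [pvScan, pvHit, pvHints, PySem.Chars.startswith, PySem.Dict.get?, PySem.Dict.getD, PySem.Dict.empty, pvOneChar_items, pvTwoChar_items, pvSubE_items, pvSubL_items, pvSubO_items, pvSubR_items, pvSubY_items, h0, h1]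
              · by_cases hfc7 : 'Y' = c
                · subst hfc7
                  by_cases h0 : 'M' = d
                  · subst h0; rfl
                  · simp [pvScan, pvHit, pvHints, PySem.Chars.startswith, PySem.Dict.get?, PySem.Dict.getD, PySem.Dict.empty, pvOneChar_items, pvTwoChar_items, pvSubE_items, pvSubL_items, pvSubO_items, pvSubR_items, pvSubY_items, h0]
                · simp [pvScan, pvHit, pvHints, PySem.Chars.startswith, PySem.Dict.get?, PySem.Dict.getD, PySem.Dict.empty, pvOneChar_items, pvTwoChar_items, pvSubE_items, pvSubL_items, pvSubO_items, pvSubR_items, pvSubY_items, hfc0, hfc1, hfc2, hfc3, hfc4, hfc5, hfc6, hfc7]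

-- ===== VERDICT (by name: the statement is the Claim_ definition above) =====
theorem infer_notam_location_hint_py_spec : Claim_equal_infer_notam_location_hint_py := by
  intro location _
  unfold Spec_infer_notam_location_hint_py
  cases location with
  | none => rfl
  | some s =>
    simp only [infer_notam_location_hint_py, infer_notam_location_hint_py_alt, pvNormalize,
               pvFirstTwoLoop_none]
    cases hn : (PySem.Chars.upper s.toList).filter (fun c => PySem.Chars.isalnum c) with
    | nil => rfl
    | cons c rest =>
      cases rest with
      | nil => simpa [pvHeadTwo] using pvScan_one c
      | cons d rest' => simpa [pvHeadTwo] using pvScan_two c d rest'
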